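-- pv_equiv track=rewrite | github.com/rslabon/aoc2016 | day2.py | press
-- ===== SOURCE A (Python) =====
-- keypad = [
--     ["1", "2", "3"],
--     ["4", "5", "6"],
--     ["7", "8", "9"],
-- ]
--
-- moves = {
--     "L": (0, -1),
--     "R": (0, 1),
--     "U": (-1, 0),
--     "D": (1, 0),
-- }
--
-- def press(current, instruction):
--     x, y = current
--     for i in instruction:
--         dx, dy = moves[i]
--         x += dx
--         x = min(x, len(keypad) - 1)
--         x = max(x, 0)
--         y += dy
--         y = min(y, len(keypad[0]) - 1)
--         y = max(y, 0)
--
--     return x, y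
-- ===== SOURCE B (Python) =====
-- # x and y evolve independently: clamp each axis in its own pass over the instruction.
-- deltas = {
--     "L": (0, -1),
--     "R": (0, 1),
--     "U": (-1, 0),
--     "D": (1, 0),
-- }
--
-- def press(current, instruction):
--     x, y = current
--     for c in instruction:
--         x = max(0, min(2, x + deltas[c][0]))
--     for c in instruction:
--         y = max(0, min(2, y + deltas[c][1]))
--     return x, y
-- ===== Notes on version B (the rewrite author's own statement) =====
-- stated objective: alternative
-- what changed: Instead of one loop carrying the (x,y) pair, B exploits that the two axes are independent and runs two separate single-axis passes over the instruction, each updating and clamping only its own coordinate.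
import Mathlib
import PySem

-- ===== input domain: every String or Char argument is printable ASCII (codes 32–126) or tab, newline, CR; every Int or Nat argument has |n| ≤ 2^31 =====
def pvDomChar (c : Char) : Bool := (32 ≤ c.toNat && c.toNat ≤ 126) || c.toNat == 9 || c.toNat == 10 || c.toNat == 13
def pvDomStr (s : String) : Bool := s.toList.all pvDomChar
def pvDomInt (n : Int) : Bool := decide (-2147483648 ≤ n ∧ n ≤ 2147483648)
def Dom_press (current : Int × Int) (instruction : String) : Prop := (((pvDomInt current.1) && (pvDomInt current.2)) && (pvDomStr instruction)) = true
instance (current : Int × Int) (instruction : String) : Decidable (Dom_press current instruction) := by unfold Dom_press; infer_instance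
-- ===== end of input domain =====

-- B runs two independent single-axis passes instead of one pass over the pair; same clamped result.

-- ===== PORT A =====
-- moves dict; lookup of an unknown char raises KeyError in Python (excluded by Pre_press),
-- here getD (0,0) is a dummy never reached inside Pre_press.
def movesA : PySem.Dict Char (Int × Int) :=
  PySem.Dict.ofList [('L', (0, -1)), ('R', (0, 1)), ('U', (-1, 0)), ('D', (1, 0))]

def press (current : Int × Int) (instruction : String) : Int × Int :=
  instruction.toList.foldl
    (fun (p : Int × Int) i =>
      let d := (PySem.Dict.get? movesA i).getD (0, 0)
      let x := p.1 + d.1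
      let x := min x 2      -- len(keypad) - 1 = 2
      let x := max x 0
      let y := p.2 + d.2
      let y := min y 2      -- len(keypad[0]) - 1 = 2
      let y := max y 0
      (x, y)) current

-- ===== PORT B =====
def press_alt (current : Int × Int) (instruction : String) : Int × Int :=
  let x := instruction.toList.foldl
    (fun x c => max 0 (min 2 (x + ((PySem.Dict.get? movesA c).getD (0, 0)).1))) current.1
  let y := instruction.toList.foldl
    (fun y c => max 0 (min 2 (y + ((PySem.Dict.get? movesA c).getD (0, 0)).2))) current.2
  (x, y)

-- ===== PRECONDITION & SPEC =====
-- Pre_ excludes instructions containing a character other than L/R/U/D, on which Python A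
-- (and Python B) raise KeyError.
def Pre_press (current : Int × Int) (instruction : String) : Prop :=
  instruction.toList.all (fun c => c == 'L' || c == 'R' || c == 'U' || c == 'D') = true
instance (current : Int × Int) (instruction : String) : Decidable (Pre_press current instruction) := by unfold Pre_press; infer_instance

def pvWitness_press : (Int × Int) × String := ((1, 1), "ULDR")

def Spec_press (current : Int × Int) (instruction : String) (out : Int × Int) : Prop := out = press_alt current instruction
instance (current : Int × Int) (instruction : String) (out : Int × Int) : Decidable (Spec_press current instruction out) := by unfold Spec_press; infer_instance

-- ===== CLAIM (what is proved, stated in full; the proofs are below) =====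
def Claim_equal_press : Prop := ∀ (current : Int × Int) (instruction : String), Dom_press current instruction → Pre_press current instruction → Spec_press current instruction (press current instruction)

-- ===== LEMMAS AND PROOFS =====

-- the paired fold splits into two independent single-axis folds
theorem press_fold_split (l : List Char) (x y : Int) :
    l.foldl
      (fun (p : Int × Int) i =>
        let d := (PySem.Dict.get? movesA i).getD (0, 0)
        let x := p.1 + d.1
        let x := min x 2
        let x := max x 0
        let y := p.2 + d.2
        let y := min y 2
        let y := max y 0
        (x, y)) (x, y)
    = (l.foldl (fun x c => max 0 (min 2 (x + ((PySem.Dict.get? movesA c).getD (0, 0)).1))) x,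
       l.foldl (fun y c => max 0 (min 2 (y + ((PySem.Dict.get? movesA c).getD (0, 0)).2))) y) := by
  induction l generalizing x y with
  | nil => rfl
  | cons c t ih =>
      simp only [List.foldl_cons]
      rw [← ih]
      have : (max (min (x + ((PySem.Dict.get? movesA c).getD (0, 0)).1) 2) 0,
              max (min (y + ((PySem.Dict.get? movesA c).getD (0, 0)).2) 2) 0)
           = ((max 0 (min 2 (x + ((PySem.Dict.get? movesA c).getD (0, 0)).1)),
               max 0 (min 2 (y + ((PySem.Dict.get? movesA c).getD (0, 0)).2))) : Int × Int) := by
        apply Prod.ext <;> omega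
      rw [this]

-- ===== VERDICT (by name: the statement is the Claim_ definition above) =====
theorem press_spec : Claim_equal_press := by
  intro current instruction _ _
  unfold Spec_press press press_alt
  exact press_fold_split instruction.toList current.1 current.2
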